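-- pv_equiv track=rewrite | github.com/Saksham1970/me-me-me-bot | general.py | permu
-- ===== SOURCE A (Python) =====
-- def permu(strs):
--     if len(strs) == 1:
--         if strs.isalnum():
--             return [strs.lower(), strs.upper()]
--         else:
--             return[strs]
--     else:
--         output = []
--         f = strs[0]
--         l = strs[1:]
--         for st in permu(l):
--             if f.isalnum():
--                 output.append(f.lower() + st)
--                 output.append(f.upper() + st)
--             else:
--                 output.append(f+st)
--         return output
-- ===== SOURCE B (Python) =====
-- def permu(strs):
--     result = [""]
--     for ch in reversed(strs):
--         opts = [ch.lower(), ch.upper()] if ch.isalnum() else [ch]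
--         result = [o + st for st in result for o in opts]
--     return result
-- ===== Notes on version B (the rewrite author's own statement) =====
-- stated objective: simpler
-- what changed: Replaces A's slice-based recursion with a single iterative right-to-left fold that rebuilds the result list per character, removing recursion and repeated string slicing.
import Mathlib
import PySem

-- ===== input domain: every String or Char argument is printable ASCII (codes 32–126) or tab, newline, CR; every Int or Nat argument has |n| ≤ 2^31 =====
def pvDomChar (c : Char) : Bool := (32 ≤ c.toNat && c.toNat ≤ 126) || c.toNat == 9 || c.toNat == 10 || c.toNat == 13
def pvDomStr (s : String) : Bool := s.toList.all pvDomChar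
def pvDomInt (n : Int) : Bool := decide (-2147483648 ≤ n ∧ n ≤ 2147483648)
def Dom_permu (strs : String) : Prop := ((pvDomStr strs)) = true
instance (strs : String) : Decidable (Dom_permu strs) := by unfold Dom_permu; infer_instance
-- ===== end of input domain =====

-- B replaces A's slice-based recursion with one iterative right-to-left fold; same cost, simpler shape.

-- ===== PORT A =====
-- recursion over the character list; the [] branch is where Python's `strs[0]` raises IndexError (excluded by Pre_)
def permuCore : List Char → List (List Char)
  | [] => []
  | [c] =>
      if PySem.Chars.strIsalnum [c] then [PySem.Chars.lower [c], PySem.Chars.upper [c]]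
      else [[c]]
  | f :: l₁ :: l₂ =>
      (permuCore (l₁ :: l₂)).foldl
        (fun output st =>
          if PySem.Chars.isalnum f then
            output ++ [PySem.Chars.lower [f] ++ st, PySem.Chars.upper [f] ++ st]
          else output ++ [[f] ++ st])
        []

def permu (strs : String) : List String := (permuCore strs.toList).map String.ofList

-- ===== PORT B =====
def permuAltCore (cs : List Char) : List (List Char) :=
  cs.reverse.foldl
    (fun result ch =>
      let opts : List (List Char) :=
        if PySem.Chars.isalnum ch then [[PySem.Chars.lowerChar ch], [PySem.Chars.upperChar ch]]
        else [[ch]]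
      result.flatMap (fun st => opts.map (· ++ st)))
    [[]]

def permu_alt (strs : String) : List String := (permuAltCore strs.toList).map String.ofList

-- ===== PRECONDITION & SPEC =====
-- A raises IndexError on the empty string (`strs[0]` in its else branch); Pre_ excludes exactly that input.
def Pre_permu (strs : String) : Prop := strs ≠ ""
instance (strs : String) : Decidable (Pre_permu strs) := by unfold Pre_permu; infer_instance
def pvWitness_permu : String := "a b"

def Spec_permu (strs : String) (out : List String) : Prop := out = permu_alt strs
instance (strs : String) (out : List String) : Decidable (Spec_permu strs out) := by unfold Spec_permu; infer_instance

-- ===== CLAIM (what is proved, stated in full; the proofs are below) =====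
def Claim_equal_permu : Prop := ∀ (strs : String), Dom_permu strs → Pre_permu strs → Spec_permu strs (permu strs)

-- ===== LEMMAS AND PROOFS =====

-- B's reverse-foldl is a foldr over the characters
theorem permuAltCore_eq_foldr (cs : List Char) :
    permuAltCore cs =
      cs.foldr
        (fun ch result =>
          result.flatMap (fun st =>
            (if PySem.Chars.isalnum ch then
                [[PySem.Chars.lowerChar ch], [PySem.Chars.upperChar ch]]
             else [[ch]]).map (· ++ st)))
        [[]] := by
  simp [permuAltCore, List.foldl_reverse]

theorem permuCore_eq_altCore (cs : List Char) (h : cs ≠ []) :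
    permuCore cs = permuAltCore cs := by
  induction cs with
  | nil => exact absurd rfl h
  | cons f l ih =>
    cases l with
    | nil =>
      simp [permuCore, permuAltCore_eq_foldr, PySem.Chars.strIsalnum,
        PySem.Chars.lower, PySem.Chars.upper]
    | cons l₁ l₂ =>
      rw [permuAltCore_eq_foldr, List.foldr_cons, ← permuAltCore_eq_foldr,
        ← ih (by simp)]
      show (permuCore (l₁ :: l₂)).foldl _ [] = _
      have hfun : (fun (output : List (List Char)) st =>
          if PySem.Chars.isalnum f = true then
            output ++ [PySem.Chars.lower [f] ++ st, PySem.Chars.upper [f] ++ st]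
          else output ++ [[f] ++ st])
          = fun output st =>
              output ++
                (if PySem.Chars.isalnum f then
                    [[PySem.Chars.lowerChar f], [PySem.Chars.upperChar f]]
                 else [[f]]).map (· ++ st) := by
        funext output st
        by_cases hf : PySem.Chars.isalnum f <;>
          simp [hf, PySem.Chars.lower, PySem.Chars.upper]
      rw [hfun, PySem.List.foldl_append_eq_flatMap]
      simp

-- ===== VERDICT (by name: the statement is the Claim_ definition above) =====
theorem permu_spec : Claim_equal_permu := by
  intro strs _ hpre
  unfold Spec_permu permu permu_alt
  rw [permuCore_eq_altCore]
  intro hnil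
  exact hpre (String.toList_eq_nil_iff.mp hnil)
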